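-- pv_equiv track=rewrite | github.com/HCui1994/Surrender-to-Reality | py/0625_minimum_factorization.py | smallest_fatorization_greedy
-- ===== SOURCE A (Python) =====
-- def smallest_fatorization_greedy(num):
--     """
--     贪心，每次找到最大的因子，放在最高位
--     """
--     if num < 10:
--         return num
--     res = 0
--     high = 1
--     while num > 1:
--         valid_flag = False
--         for factor in range(9, 1, -1):
--             if num % factor == 0:
--                 num //= factor
--                 res += factor * high
--                 high *= 10
--                 valid_flag = True
--                 break
--         if not valid_flag:
--             return 0
--     if res >= 2 ** 31:
--         return 0
--     else:
--         return res
-- ===== SOURCE B (Python) =====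
-- def smallest_fatorization_greedy(num):
--     if num < 10:
--         return num
--     digits = []
--     for d in range(9, 1, -1):
--         while num % d == 0:
--             num //= d
--             digits.append(d)
--     if num > 1:
--         return 0
--     res = 0
--     high = 1
--     for d in digits:
--         res += d * high
--         high *= 10
--     return 0 if res >= 2 ** 31 else res
-- ===== Notes on version B (the rewrite author's own statement) =====
-- stated objective: alternative
-- what changed: Replaces the restart-from-9 rescan inside the while loop by a single monotonic sweep d=9..2 that extracts each digit's full multiplicity, collecting the digits first and building the positional result in a separate pass.
import Mathlib
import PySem

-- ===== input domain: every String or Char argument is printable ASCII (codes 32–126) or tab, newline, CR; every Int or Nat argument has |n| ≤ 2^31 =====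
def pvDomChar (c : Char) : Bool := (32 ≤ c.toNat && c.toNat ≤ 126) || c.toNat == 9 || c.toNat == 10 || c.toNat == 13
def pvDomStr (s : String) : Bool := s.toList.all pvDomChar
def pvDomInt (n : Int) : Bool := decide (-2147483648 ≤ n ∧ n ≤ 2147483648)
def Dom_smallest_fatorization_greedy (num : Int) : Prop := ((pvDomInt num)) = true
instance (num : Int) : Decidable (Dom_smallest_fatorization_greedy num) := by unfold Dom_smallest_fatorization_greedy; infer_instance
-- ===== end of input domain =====

-- B replaces A's restart-from-9 rescan with one monotonic 9→2 sweep extracting each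
-- digit's full multiplicity, then builds the positional result in a separate pass
-- (alternative structure, same cost).


-- ===== PORT A =====
-- first divisor found by A's inner 'for factor in range(9, 1, -1)' scan (break on hit)
def pvScan (num : Int) : Option Int :=
  (PySem.List.pyRange 9 1 (-1)).find? (fun f => PySem.Int.mod num f == 0)

theorem pvScan_some {num f : Int} (h : pvScan num = some f) :
    2 ≤ f ∧ f ≤ 9 ∧ PySem.Int.mod num f = 0 := by
  have hmem := List.mem_of_find?_eq_some h
  have hp := List.find?_some h
  have hf : 2 ≤ f ∧ f ≤ 9 := by
    have := (PySem.List.mem_pyRange_neg_one).1 hmem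
    omega
  refine ⟨hf.1, hf.2, ?_⟩
  simpa using hp

theorem pvDiv_toNat_lt {num f : Int} (h1 : 1 < num) (h2 : 2 ≤ f)
    (h3 : PySem.Int.mod num f = 0) :
    (PySem.Int.floordiv num f).toNat < num.toNat := by
  have hdvd : f ∣ num := (PySem.Int.mod_eq_zero_iff_dvd num f).1 h3
  have hfd : PySem.Int.floordiv num f = num / f :=
    PySem.Int.floordiv_eq_ediv_of_pos (by omega)
  have hlt : num / f < num :=
    (Int.ediv_lt_iff_of_dvd_of_pos (by omega) hdvd).2 (by nlinarith)
  have hnn : 0 ≤ num / f := Int.ediv_nonneg (by omega) (by omega)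
  rw [hfd]; omega

-- A's while loop, carrying (num, res, high)
def pvLoopA (num res high : Int) : Int :=
  if h1 : 1 < num then
    match h : pvScan num with
    | some f =>
        pvLoopA (PySem.Int.floordiv num f) (res + f * high) (high * 10)
    | none => 0
  else
    if 2 ^ 31 ≤ res then 0 else res
termination_by num.toNat
decreasing_by
  exact pvDiv_toNat_lt h1 (pvScan_some h).1 (pvScan_some h).2.2

def smallest_fatorization_greedy (num : Int) : Int :=
  if num < 10 then num else pvLoopA num 0 1

-- ===== PORT B =====
-- B's inner 'while num % d == 0'.  The extra '1 < num ∧ 2 ≤ d' conjuncts are a pure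
-- totality guard: on every state B reaches (num ≥ 1, d drawn from range(9,1,-1))
-- they are implied by 'num % d == 0' (1 % d ≠ 0 for d ≥ 2).
def pvDivAll (d num : Int) (digits : List Int) : Int × List Int :=
  if h : 1 < num ∧ 2 ≤ d ∧ PySem.Int.mod num d = 0 then
    pvDivAll d (PySem.Int.floordiv num d) (digits ++ [d])
  else (num, digits)
termination_by num.toNat
decreasing_by
  exact pvDiv_toNat_lt h.1 h.2.1 h.2.2

-- B's 'for d in range(9, 1, -1)' sweep collecting the digit list
def pvSweep (num : Int) : Int × List Int :=
  (PySem.List.pyRange 9 1 (-1)).foldl (fun s d => pvDivAll d s.1 s.2) (num, [])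

-- B's build pass: res/high accumulation over the collected digits
def pvBuild (digits : List Int) : Int × Int :=
  digits.foldl (fun s d => (s.1 + d * s.2, s.2 * 10)) (0, 1)

def pvFinish (s : Int × List Int) : Int :=
  if 1 < s.1 then 0
  else if 2 ^ 31 ≤ (pvBuild s.2).1 then 0 else (pvBuild s.2).1

def smallest_fatorization_greedy_alt (num : Int) : Int :=
  if num < 10 then num else pvFinish (pvSweep num)

-- ===== PRECONDITION & SPEC =====
def Spec_smallest_fatorization_greedy (num : Int) (out : Int) : Prop := out = smallest_fatorization_greedy_alt num
instance (num : Int) (out : Int) : Decidable (Spec_smallest_fatorization_greedy num out) := by unfold Spec_smallest_fatorization_greedy; infer_instance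

-- ===== CLAIM (what is proved, stated in full; the proofs are below) =====
def Claim_equal_smallest_fatorization_greedy : Prop := ∀ (num : Int), Dom_smallest_fatorization_greedy num → Spec_smallest_fatorization_greedy num (smallest_fatorization_greedy num)

-- ===== LEMMAS AND PROOFS =====

theorem pvDivAll_stop {d num : Int} (digits : List Int)
    (h : ¬(1 < num ∧ 2 ≤ d ∧ PySem.Int.mod num d = 0)) :
    pvDivAll d num digits = (num, digits) := by
  rw [pvDivAll]; simp [h]

theorem pvDivAll_step {d num : Int} (digits : List Int)
    (h : 1 < num ∧ 2 ≤ d ∧ PySem.Int.mod num d = 0) :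
    pvDivAll d num digits =
      pvDivAll d (PySem.Int.floordiv num d) (digits ++ [d]) := by
  rw [pvDivAll]; simp [h]

theorem foldl_divAll_one (ds : List Int) (digits : List Int) :
    ds.foldl (fun s d => pvDivAll d s.1 s.2) (1, digits) = (1, digits) := by
  induction ds generalizing digits with
  | nil => rfl
  | cons d t ih =>
      have hs : pvDivAll d 1 digits = (1, digits) :=
        pvDivAll_stop digits (fun hc => absurd hc.1 (by norm_num))
      simp only [List.foldl_cons, hs]
      exact ih digits

-- A's scan ignores the already-exhausted factors above k
theorem find?_range_drop (p : Int → Bool) :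
    ∀ (n : Nat) (a k : Int), a - k = n → 2 ≤ k → k ≤ a →
      (∀ e : Int, k < e → e ≤ a → p e = false) →
      (PySem.List.pyRange a 1 (-1)).find? p = (PySem.List.pyRange k 1 (-1)).find? p := by
  intro n
  induction n with
  | zero =>
      intro a k h1 _ _ _
      have hak : a = k := by omega
      rw [hak]
  | succ m ih =>
      intro a k h1 hk2 h2 hp
      rw [PySem.List.pyRange_neg_one_cons (by omega : (1:Int) < a)]
      rw [List.find?_cons_of_neg (by rw [hp a (by omega) le_rfl]; simp)]
      exact ih (a - 1) k (by omega) hk2 (by omega)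
        (fun e he1 he2 => hp e he1 (by omega))

theorem pvBuild_append (digits : List Int) (d : Int) :
    pvBuild (digits ++ [d]) =
      ((pvBuild digits).1 + d * (pvBuild digits).2, (pvBuild digits).2 * 10) := by
  simp [pvBuild, List.foldl_append]

-- main invariant: A's restart-scan loop equals B's sweep from k downward, provided
-- no factor above k divides num and (res, high) is the build state of `digits`
theorem pvKey :
    ∀ (m : Nat) (num k : Int), 1 ≤ num → 2 ≤ k → k ≤ 9 →
      num.toNat * 10 + k.toNat ≤ m →
      (∀ e : Int, k < e → e ≤ 9 → PySem.Int.mod num e ≠ 0) →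
      ∀ (res high : Int) (digits : List Int), (res, high) = pvBuild digits →
      pvLoopA num res high =
        pvFinish ((PySem.List.pyRange k 1 (-1)).foldl
          (fun s d => pvDivAll d s.1 s.2) (num, digits)) := by
  intro m
  induction m with
  | zero => intro num k _ hk _ hm _; omega
  | succ m ih =>
      intro num k hnum hk2 hk9 hm hnone res high digits hbuild
      by_cases h1 : 1 < num
      · -- loop body runs
        by_cases hdvd : PySem.Int.mod num k = 0
        · -- A picks factor k; B divides by k once and stays at k
          have hscan : pvScan num = some k := by
            unfold pvScan
            rw [find?_range_drop _ (9 - k).toNat 9 k (by omega) hk2 hk9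
                (fun e he1 he2 => by
                  simp only [beq_eq_false_iff_ne, ne_eq]
                  exact hnone e he1 he2)]
            rw [PySem.List.pyRange_neg_one_cons (by omega : (1:Int) < k)]
            rw [List.find?_cons_of_pos (by simp only [beq_iff_eq]; exact hdvd)]
          have hkd : k ∣ num := (PySem.Int.mod_eq_zero_iff_dvd num k).1 hdvd
          have hfd : PySem.Int.floordiv num k = num / k :=
            PySem.Int.floordiv_eq_ediv_of_pos (by omega)
          have hq1 : 1 ≤ num / k := by
            obtain ⟨q, hq⟩ := hkd
            have hq0 : 1 ≤ q := by nlinarith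
            rw [hq, Int.mul_ediv_cancel_left _ (by omega : k ≠ 0)]
            exact hq0
          have hlt : (PySem.Int.floordiv num k).toNat < num.toNat :=
            pvDiv_toNat_lt h1 hk2 hdvd
          -- IH at num/k with the same k
          have hih := ih (PySem.Int.floordiv num k) k (by rw [hfd]; omega) hk2 hk9
            (by omega)
            (by
              intro e he1 he2 hmod
              obtain ⟨q, hq⟩ := (PySem.Int.mod_eq_zero_iff_dvd _ e).1 hmod
              have hcancel : num / k * k = num := Int.ediv_mul_cancel hkd
              rw [hfd] at hq
              have : e ∣ num := ⟨q * k, by rw [← hcancel, hq]; ring⟩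
              exact hnone e he1 (by omega)
                ((PySem.Int.mod_eq_zero_iff_dvd num e).2 this))
            (res + k * high) (high * 10) (digits ++ [k])
            (by rw [pvBuild_append, ← hbuild])
          have hcons := PySem.List.pyRange_neg_one_cons (by omega : (1:Int) < k)
          rw [hcons] at hih ⊢
          simp only [List.foldl_cons] at hih ⊢
          rw [pvDivAll_step digits ⟨h1, hk2, hdvd⟩]
          rw [pvLoopA]
          simp only [dif_pos h1]
          rw [hscan]
          exact hih
        · -- k does not divide num
          by_cases hk2' : k = 2
          · -- no factor at all: A returns 0, B's remainder stays > 1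
            subst hk2'
            have hscan : pvScan num = none := by
              unfold pvScan
              rw [find?_range_drop _ 7 9 2 (by omega) (by omega) (by omega)
                  (fun e he1 he2 => by
                    simp only [beq_eq_false_iff_ne, ne_eq]
                    exact hnone e he1 he2)]
              rw [PySem.List.pyRange_neg_one_cons (by omega : (1:Int) < 2)]
              rw [List.find?_cons_of_neg
                    (by simp only [beq_iff_eq]; exact hdvd)]
              rw [show ((2:Int) - 1) = 1 by norm_num,
                  PySem.List.pyRange_neg_one_eq_nil (by omega : (1:Int) ≤ 1)]
              rfl
            rw [pvLoopA]
            simp only [dif_pos h1]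
            rw [hscan]
            rw [PySem.List.pyRange_neg_one_cons (by omega : (1:Int) < 2)]
            rw [show ((2:Int) - 1) = 1 by norm_num,
                PySem.List.pyRange_neg_one_eq_nil (by omega : (1:Int) ≤ 1)]
            simp only [List.foldl_cons, List.foldl_nil]
            rw [pvDivAll_stop digits (by tauto)]
            unfold pvFinish
            simp [h1]
          · -- step down to k - 1
            have hcons := PySem.List.pyRange_neg_one_cons (by omega : (1:Int) < k)
            rw [hcons]
            simp only [List.foldl_cons]
            rw [pvDivAll_stop digits (by tauto)]
            refine ih num (k - 1) hnum (by omega) (by omega) (by omega) ?_ _ _ _ hbuild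
            intro e he1 he2
            by_cases he : e = k
            · subst he; exact hdvd
            · exact hnone e (by omega) he2
      · -- num = 1: loop exits, B's sweep is inert
        have hone : num = 1 := by omega
        subst hone
        rw [pvLoopA]
        simp only [dif_neg h1]
        rw [foldl_divAll_one]
        unfold pvFinish
        rw [← hbuild]
        simp

-- ===== VERDICT (by name: the statement is the Claim_ definition above) =====
theorem smallest_fatorization_greedy_spec : Claim_equal_smallest_fatorization_greedy := by
  intro num _
  unfold Spec_smallest_fatorization_greedy smallest_fatorization_greedy
    smallest_fatorization_greedy_alt
  by_cases hlt : num < 10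
  · simp [hlt]
  · simp only [if_neg hlt]
    unfold pvSweep
    exact pvKey (num.toNat * 10 + 9) num 9 (by omega) (by omega) (by omega)
      (by omega) (fun e he1 he2 _ => by omega) 0 1 [] rfl
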